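-- pv_equiv track=rewrite | github.com/VascoSch92/symmetria | symmetria/elements/cycles.py | _validate_and_standardize
-- ===== SOURCE A (Python) =====
-- from typing import (
--     Tuple,
--     Iterable,
--     Dict,
--     Any,
--     Union,
--     Set,
--     List,
-- )
--
-- def _validate_and_standardize(cycle: Tuple[int, ...]) -> Tuple[int, ...]:
--     """
--     Private method to validate and standardize a set of integers to form a cycle.
--     A tuple is eligible to be a cycle if it contains only strictly positive integers.
--     The standard form for a cycle is the (unique) one where the first element is the smallest.
--     """
--     for element in cycle:
--         if isinstance(element, int) is False:
--             raise ValueError(f"Expected `int` type, but got {type(element)}.")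
--         if element < 1:
--             raise ValueError(f"Expected all strictly positive values, but got {element}.")
--
--     smallest_element_index = cycle.index(min(cycle))
--     if smallest_element_index == 0:
--         return tuple(cycle)
--     return cycle[smallest_element_index:] + cycle[:smallest_element_index]
-- ===== SOURCE B (Python) =====
-- def _validate_and_standardize(cycle):
--     """Build the standardized cycle directly in one pass: `head` holds the
--     elements from the first occurrence of the running minimum onward, `tail`
--     the elements before it; a new strict minimum flushes head into tail."""
--     head = []
--     tail = []
--     for element in cycle:
--         if isinstance(element, int) is False:
--             raise ValueError(f"Expected `int` type, but got {type(element)}.")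
--         if element < 1:
--             raise ValueError(f"Expected all strictly positive values, but got {element}.")
--         if not head or element < head[0]:
--             tail += head
--             head = [element]
--         else:
--             head.append(element)
--     return tuple(head + tail)
-- ===== Notes on version B (the rewrite author's own statement) =====
-- stated objective: alternative
-- what changed: B constructs the rotated cycle directly in one pass with two accumulators (head from the first occurrence of the running minimum, tail before it), instead of A's validation loop followed by min(), tuple.index() and slice concatenation; Pre_ excludes exactly the inputs on which A raises ValueError (the empty tuple, or an element < 1).
import Mathlib
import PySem

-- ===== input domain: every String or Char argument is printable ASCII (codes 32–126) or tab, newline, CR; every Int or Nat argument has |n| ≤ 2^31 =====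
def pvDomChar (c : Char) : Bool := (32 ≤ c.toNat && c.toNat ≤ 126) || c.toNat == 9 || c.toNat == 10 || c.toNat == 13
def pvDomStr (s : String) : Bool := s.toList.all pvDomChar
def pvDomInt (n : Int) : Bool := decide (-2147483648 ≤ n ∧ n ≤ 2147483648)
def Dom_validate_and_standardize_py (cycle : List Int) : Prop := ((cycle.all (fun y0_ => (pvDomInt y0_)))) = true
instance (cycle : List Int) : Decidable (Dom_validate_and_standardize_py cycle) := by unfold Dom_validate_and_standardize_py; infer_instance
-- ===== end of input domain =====

-- B builds the rotated cycle directly in one pass with head/tail accumulators, instead of A's min() + index() + slice concatenation (objective: alternative).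


-- ===== PORT A =====
-- A: validation loop (raises → [], excluded by Pre_), then min(), tuple.index(), slice rotation.
def validate_and_standardize_py (cycle : List Int) : List Int :=
  if cycle.any (fun e => e < 1) then []            -- ValueError in the validation loop; outside Pre_
  else
    match PySem.List.min? cycle (fun x => x) with
    | none => []                                   -- min(()) raises ValueError; outside Pre_
    | some m =>
      match PySem.List.index? cycle m with
      | none => []                                 -- unreachable: min is a member
      | some k =>
        if k = 0 then cycle
        else PySem.List.slice cycle (some (k : Int)) none ++ PySem.List.slice cycle none (some (k : Int))

-- ===== PORT B =====
-- one pass with two accumulators: head = from the first occurrence of the running minimum onward,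
-- tail = the elements before it; a bad element (raise) yields none, excluded by Pre_
def pvAltLoop (xs : List Int) (head tail : List Int) : Option (List Int × List Int) :=
  match xs with
  | [] => some (head, tail)
  | e :: t =>
    if e < 1 then none
    else
      match head with
      | [] => pvAltLoop t [e] tail
      | h :: _ => if e < h then pvAltLoop t [e] (tail ++ head) else pvAltLoop t (head ++ [e]) tail

def validate_and_standardize_py_alt (cycle : List Int) : List Int :=
  match pvAltLoop cycle [] [] with
  | none => []                                     -- ValueError on an element < 1; outside Pre_
  | some (h, t) => h ++ t

-- ===== PRECONDITION & SPEC =====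
-- A raises ValueError on the empty tuple (min of empty sequence) and on any element < 1; exactly those inputs are excluded.
def Pre_validate_and_standardize_py (cycle : List Int) : Prop := cycle ≠ [] ∧ ∀ e ∈ cycle, 1 ≤ e
instance (cycle : List Int) : Decidable (Pre_validate_and_standardize_py cycle) := by unfold Pre_validate_and_standardize_py; infer_instance
def pvWitness_validate_and_standardize_py : List Int := [3, 1, 2, 1]

def Spec_validate_and_standardize_py (cycle : List Int) (out : List Int) : Prop := out = validate_and_standardize_py_alt cycle
instance (cycle : List Int) (out : List Int) : Decidable (Spec_validate_and_standardize_py cycle out) := by unfold Spec_validate_and_standardize_py; infer_instance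

-- ===== CLAIM (what is proved, stated in full; the proofs are below) =====
def Claim_equal_validate_and_standardize_py : Prop := ∀ (cycle : List Int), Dom_validate_and_standardize_py cycle → Pre_validate_and_standardize_py cycle → Spec_validate_and_standardize_py cycle (validate_and_standardize_py cycle)

-- ===== LEMMAS AND PROOFS =====

theorem pvFoldlMin_le (t : List Int) (b : Int) : t.foldl min b ≤ b := by
  induction t generalizing b with
  | nil => simp
  | cons e t ih => exact le_trans (ih (min b e)) (min_le_left _ _)

-- the loop with a nonempty head computes the rotation of (head ++ tail ++ xs) in terms of
-- the running minimum and the index of its first improvement in xs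
theorem pvAltLoop_spec (xs : List Int) (h : Int) (hs tail : List Int) (hx : ∀ e ∈ xs, 1 ≤ e) :
    pvAltLoop xs (h :: hs) tail =
      (if xs.foldl min h < h then
        some ((xs.foldl min h) :: xs.drop (List.idxOf (xs.foldl min h) xs + 1),
              tail ++ (h :: hs) ++ xs.take (List.idxOf (xs.foldl min h) xs))
       else some ((h :: hs) ++ xs, tail)) := by
  induction xs generalizing h hs tail with
  | nil => simp [pvAltLoop]
  | cons e t ih =>
    have he : ¬ e < 1 := by simpa using hx e (by simp)
    have ht : ∀ x ∈ t, 1 ≤ x := fun x hx' => hx x (by simp [hx'])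
    by_cases hlt : e < h
    · have hmin : min h e = e := by omega
      have hle : t.foldl min e ≤ e := pvFoldlMin_le t e
      rw [pvAltLoop]
      simp only [he, if_false, hlt, if_true, ih e [] (tail ++ (h :: hs)) ht]
      have hfold : (e :: t).foldl min h = t.foldl min e := by simp [List.foldl, hmin]
      by_cases h2 : t.foldl min e < e
      · rw [if_pos h2, hfold, if_pos (by omega), List.idxOf_cons_ne _ (by omega)]
        simp
      · have heq : t.foldl min e = e := by omega
        rw [if_neg h2, hfold, heq, if_pos (by omega), List.idxOf_cons_self]
        simp
    · have hmin : min h e = h := by omega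
      have hle : t.foldl min h ≤ h := pvFoldlMin_le t h
      rw [pvAltLoop]
      simp only [he, if_false, hlt, if_false]
      have hfold : (e :: t).foldl min h = t.foldl min h := by simp [List.foldl, hmin]
      rw [hfold, show ((h :: hs) ++ [e] : List Int) = h :: (hs ++ [e]) from by simp,
          ih h (hs ++ [e]) tail ht]
      by_cases h2 : t.foldl min h < h
      · rw [if_pos h2, List.idxOf_cons_ne _ (by omega)]
        simp
        omega
      · rw [if_neg h2]
        simp
        omega

-- ===== VERDICT (by name: the statement is the Claim_ definition above) =====
theorem validate_and_standardize_py_spec : Claim_equal_validate_and_standardize_py := by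
  intro cycle _ hpre
  obtain ⟨hne, hpos⟩ := hpre
  unfold Spec_validate_and_standardize_py
  match cycle, hne with
  | x :: t, _ =>
    have hx1 : ¬ x < 1 := by simpa using hpos x (by simp)
    have ht : ∀ e ∈ t, 1 ≤ e := fun e he => hpos e (by simp [he])
    have hany : ((x :: t).any (fun e => decide (e < 1))) = false := by
      rw [List.any_eq_false]
      intro e he
      simpa using hpos e he
    unfold validate_and_standardize_py validate_and_standardize_py_alt
    rw [if_neg (by simp [hany]), PySem.List.min?_id_cons]
    have hloop : pvAltLoop (x :: t) [] [] = pvAltLoop t [x] [] := by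
      rw [pvAltLoop]; simp [hx1]
    rw [hloop, pvAltLoop_spec t x [] [] ht]
    set M := t.foldl min x with hM
    have hMle : M ≤ x := pvFoldlMin_le t x
    dsimp only
    rw [PySem.List.index?_eq_idxOf?]
    by_cases hlt : M < x
    · have hmem : M ∈ t := by
        have hmx : M ∈ x :: t := by
          have := PySem.List.min?_mem (xs := x :: t) (key := fun y => y)
            (by rw [PySem.List.min?_id_cons])
          simpa [hM] using this
        rcases List.mem_cons.mp hmx with h | h
        · omega
        · exact h
      rw [if_pos hlt]
      set k' := List.idxOf M t with hk'
      have hk'lt : k' < t.length := List.idxOf_lt_length_of_mem hmem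
      have hidx : List.idxOf? M (x :: t) = some (k' + 1) := by
        have h1 : List.idxOf M (x :: t) = k' + 1 := by
          rw [List.idxOf_cons_ne _ (by omega)]
        have h2 : List.idxOf? M (x :: t) = some (List.idxOf M (x :: t)) := by
          obtain ⟨j, hj⟩ := Option.isSome_iff_exists.mp
            (List.isSome_idxOf?.mpr (show M ∈ x :: t from List.mem_cons_of_mem _ hmem))
          rw [List.idxOf_eq_getD_idxOf?, hj]; rfl
        rw [h2, h1]
      rw [hidx]
      dsimp only
      rw [if_neg (by omega : ¬ (k' + 1 = 0))]
      have hdropA : PySem.List.slice (x :: t) (some ((k' + 1 : ℕ) : Int)) none = (x :: t).drop (k' + 1) := by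
        rw [PySem.List.slice_from_natCast]
      have htakeA : PySem.List.slice (x :: t) none (some ((k' + 1 : ℕ) : Int)) = (x :: t).take (k' + 1) := by
        rw [PySem.List.slice_to_natCast]
      rw [hdropA, htakeA]
      have hget : t[k'] = M := List.getElem_idxOf hk'lt
      have hdropB : t.drop k' = M :: t.drop (k' + 1) := by
        rw [List.drop_eq_getElem_cons hk'lt, hget]
      simp [List.drop_succ_cons, List.take_succ_cons, hdropB]
    · have heq : M = x := by omega
      rw [if_neg hlt, heq, show List.idxOf? x (x :: t) = some 0 from by simp [List.idxOf?_cons]]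
      simp
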